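-- pv_equiv track=rewrite | github.com/Yosshi999/ARCGolfVisualizer | outputs/task256/2787_fromdsl.py | underfill
-- ===== SOURCE A (Python) =====
-- def mostcolor(element):
--     values = [v for r in element for v in r] if isinstance(element, tuple) else [v for (v, _) in element]
--     return max(set(values), key=values.count)
--
-- def toindices(patch):
--     if len(patch) == 0:
--         return frozenset()
--     if isinstance(next(iter(patch))[1], tuple):
--         return frozenset((index for (value, index) in patch))
--     return patch
--
-- def underfill(grid, value, patch):
--     (h, w) = (len(grid), len(grid[0]))
--     bg = mostcolor(grid)
--     g = list((list(r) for r in grid))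
--     for (i, j) in toindices(patch):
--         if 0 <= i < h and 0 <= j < w:
--             if g[i][j] == bg:
--                 g[i][j] = value
--     return tuple((tuple(r) for r in g))
-- ===== SOURCE B (Python) =====
-- def underfill(grid, value, patch):
--     cells = [v for row in grid for v in row]
--     counts = {}
--     for v in cells:
--         counts[v] = counts.get(v, 0) + 1
--     bg = max(counts, key=counts.get)
--     targets = set(patch)
--     return tuple(tuple(value if ((i, j) in targets and v == bg) else v
--                        for j, v in enumerate(row))
--                  for i, row in enumerate(grid))
-- ===== Notes on version B (the rewrite author's own statement) =====
-- stated objective: idiomatic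
-- what changed: Instead of mutating a copy of the grid while iterating over the patch with explicit bounds checks, B counts colours in one dict pass, takes the background as the first-seen maximal colour, and rebuilds the grid by scanning every cell with a membership test against set(patch).
-- outside the precondition, e.g. on underfill(((2, 1),), 5, {(0, 1)}): A returns ((2, 5),), B returns ((2, 1),); on underfill(((5,), (1, 1)), 7, {(1, 1)}): A returns ((5,), (1, 1)), B returns ((5,), (1, 7))
import Mathlib
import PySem

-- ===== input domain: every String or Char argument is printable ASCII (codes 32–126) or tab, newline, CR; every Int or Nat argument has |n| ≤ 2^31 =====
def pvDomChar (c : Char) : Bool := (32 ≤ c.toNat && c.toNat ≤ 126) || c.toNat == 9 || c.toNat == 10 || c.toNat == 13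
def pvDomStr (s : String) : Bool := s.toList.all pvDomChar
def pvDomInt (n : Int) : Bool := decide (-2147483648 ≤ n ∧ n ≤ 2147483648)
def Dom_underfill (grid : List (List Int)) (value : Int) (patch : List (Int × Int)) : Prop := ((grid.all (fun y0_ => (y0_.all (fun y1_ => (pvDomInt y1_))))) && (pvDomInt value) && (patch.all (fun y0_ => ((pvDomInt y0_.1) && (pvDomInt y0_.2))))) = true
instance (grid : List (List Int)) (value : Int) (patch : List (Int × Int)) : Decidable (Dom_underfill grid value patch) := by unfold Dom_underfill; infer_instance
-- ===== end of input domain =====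

-- B rebuilds the grid by scanning every cell against set(patch) and a counting
-- dict, instead of A's patch-iteration over a mutated copy with bounds checks.

-- ===== PORT A =====
-- mostcolor(grid) with grid a tuple of rows: flatten, then max(set(values), key=values.count).
-- Pre_ guarantees a unique most-frequent value, so the result does not depend on the
-- (unmodelled) CPython set iteration order; `.getD 0` is only reached when values = [],
-- where Python raises ValueError (excluded by Pre_).
def mostcolorA (element : List (List Int)) : Int :=
  let values := element.flatMap (fun r => r)
  (PySem.List.max? (PySem.Set.ofList values) (fun v => values.count v)).getD 0

-- toindices(patch): at this type patch is already a set of index pairs (the second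
-- component is an int, never a tuple), so only the empty-patch branch and the
-- final `return patch` are reachable.
def toindicesA (patch : List (Int × Int)) : List (Int × Int) :=
  if patch.length = 0 then [] else patch

-- the loop body: `if 0 <= i < h and 0 <= j < w: if g[i][j] == bg: g[i][j] = value`.
-- After the bounds test, i and j are nonnegative and (by Pre_'s ragged-grid clause)
-- j indexes row i, so `.toNat`/`getD` reads exactly what Python reads; where Python
-- would raise IndexError (j < w but row i shorter) the input is outside Pre_.
def pvFillA (value h w bg : Int) (g : List (List Int)) (p : Int × Int) : List (List Int) :=
  if 0 ≤ p.1 ∧ p.1 < h ∧ 0 ≤ p.2 ∧ p.2 < w then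
    if (g.getD p.1.toNat []).getD p.2.toNat 0 = bg
    then g.set p.1.toNat ((g.getD p.1.toNat []).set p.2.toNat value) else g
  else g

def underfill (grid : List (List Int)) (value : Int) (patch : List (Int × Int)) : List (List Int) :=
  let h : Int := grid.length
  let w : Int := ((PySem.List.pyGet? grid 0).getD []).length  -- grid[0]; none = IndexError on empty grid, excluded by Pre_
  let bg := mostcolorA grid
  (toindicesA patch).foldl (pvFillA value h w bg) grid

-- ===== PORT B =====
def underfill_alt (grid : List (List Int)) (value : Int) (patch : List (Int × Int)) : List (List Int) :=
  let cells := grid.flatMap (fun r => r)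
  let counts : PySem.Dict Int Int := cells.foldl (fun d v => d.insert v (d.getD v 0 + 1)) PySem.Dict.empty
  let bg := (PySem.List.max? (PySem.Dict.keys counts) (fun k => counts.getD k 0)).getD 0  -- max(counts, key=counts.get); none only for an empty grid (ValueError, outside Pre_)
  let targets := PySem.Set.ofList patch
  (PySem.List.enumerate grid 0).map (fun ir =>
    (PySem.List.enumerate ir.2 0).map (fun jv =>
      if PySem.Set.contains targets (ir.1, jv.1) && (jv.2 == bg) then value else jv.2))

-- ===== PRECONDITION & SPEC =====
-- Pre_ excludes: (a) inputs where A raises — empty grid (IndexError), grid with no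
-- cells (ValueError in max), and patches hitting j < len(grid[0]) ≤ j-th cell of a
-- shorter row (IndexError); (b) defensible-corner artefacts of A where it still
-- returns — a patch index beyond row 0's width but inside a longer ragged row
-- (A's skip by row-0 width is accidental), and grids without a unique most-frequent
-- colour whose patch hits a real cell (A's background pick then depends on CPython
-- set iteration order, which no implementation should be held to).
def Pre_underfill (grid : List (List Int)) (value : Int) (patch : List (Int × Int)) : Prop :=
  grid ≠ [] ∧
  grid.flatMap (fun r => r) ≠ [] ∧
  (∀ p ∈ patch, 0 ≤ p.1 → p.1 < (grid.length : Int) → 0 ≤ p.2 →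
      (p.2 < ((grid.headD []).length : Int) ↔ p.2 < ((grid.getD p.1.toNat []).length : Int))) ∧
  ((∃ p ∈ patch, 0 ≤ p.1 ∧ p.1 < (grid.length : Int) ∧ 0 ≤ p.2 ∧ p.2 < ((grid.getD p.1.toNat []).length : Int)) →
    ∃ m ∈ grid.flatMap (fun r => r), ∀ v ∈ grid.flatMap (fun r => r), v ≠ m →
      (grid.flatMap (fun r => r)).count v < (grid.flatMap (fun r => r)).count m)
instance (grid : List (List Int)) (value : Int) (patch : List (Int × Int)) : Decidable (Pre_underfill grid value patch) := by unfold Pre_underfill; infer_instance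

def pvWitness_underfill : List (List Int) × Int × (List (Int × Int)) := ([[1, 2], [1, 3]], 9, [(0, 1)])

def Spec_underfill (grid : List (List Int)) (value : Int) (patch : List (Int × Int)) (out : List (List Int)) : Prop := out = underfill_alt grid value patch
instance (grid : List (List Int)) (value : Int) (patch : List (Int × Int)) (out : List (List Int)) : Decidable (Spec_underfill grid value patch out) := by unfold Spec_underfill; infer_instance

-- ===== CLAIM (what is proved, stated in full; the proofs are below) =====
def Claim_equal_underfill : Prop := ∀ (grid : List (List Int)) (value : Int) (patch : List (Int × Int)), Dom_underfill grid value patch → Pre_underfill grid value patch → Spec_underfill grid value patch (underfill grid value patch)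

-- ===== LEMMAS AND PROOFS =====

-- the value of A's grid copy at cell (i, j) after the updates of Q have been applied
def pvModel (grid : List (List Int)) (value bg w : Int) (Q : List (Int × Int)) (i j : Nat) : Int :=
  if ((i : Int), (j : Int)) ∈ Q ∧ (j : Int) < w ∧ (grid.getD i []).getD j 0 = bg then value
  else (grid.getD i []).getD j 0

lemma pv_getD_set {α : Type} [Inhabited α] (l : List α) (n i : Nat) (x d : α) (hn : n < l.length) :
    (l.set n x).getD i d = if i = n then x else l.getD i d := by
  rw [List.getD_eq_getElem?_getD, List.getD_eq_getElem?_getD, List.getElem?_set]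
  by_cases h : i = n
  · subst h; simp [hn]
  · simp [h, fun a => (Ne.symm h : n ≠ i) a]

lemma pv_max?_of_unique {α κ : Type} [BEq α] [LinearOrder κ] (l : List α) (key : α → κ) (m : α)
    (hm : m ∈ l) (hstrict : ∀ v ∈ l, v ≠ m → key v < key m) :
    PySem.List.max? l key = some m := by
  cases h : PySem.List.max? l key with
  | none =>
    rw [(PySem.List.max?_eq_none_iff l key).mp h] at hm
    exact absurd hm (List.not_mem_nil)
  | some m' =>
    have hmem := PySem.List.max?_mem h
    by_cases he : m' = m
    · rw [he]
    · exact absurd (PySem.List.max?_isMax h m hm) (not_le.mpr (hstrict m' hmem he))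

-- A's background under a unique most-frequent colour
lemma pv_bgA (grid : List (List Int)) (m : Int) (hm : m ∈ grid.flatMap (fun r => r))
    (hstrict : ∀ v ∈ grid.flatMap (fun r => r), v ≠ m →
      (grid.flatMap (fun r => r)).count v < (grid.flatMap (fun r => r)).count m) :
    mostcolorA grid = m := by
  show (PySem.List.max? (PySem.Set.ofList (grid.flatMap (fun r => r)))
      (fun v => (grid.flatMap (fun r => r)).count v)).getD 0 = m
  rw [pv_max?_of_unique _ _ m ((PySem.Set.mem_ofList _ m).mpr hm)
      (fun v hv hne => hstrict v ((PySem.Set.mem_ofList _ v).mp hv) hne)]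
  rfl

-- B's background under a unique most-frequent colour
lemma pv_bgB (cells : List Int) (m : Int) (hm : m ∈ cells)
    (hstrict : ∀ v ∈ cells, v ≠ m → cells.count v < cells.count m) :
    (PySem.List.max?
      (PySem.Dict.keys (cells.foldl (fun d v => d.insert v (d.getD v 0 + 1)) (PySem.Dict.empty : PySem.Dict Int Int)))
      (fun k => (cells.foldl (fun d v => d.insert v (d.getD v 0 + 1)) (PySem.Dict.empty : PySem.Dict Int Int)).getD k 0)).getD 0 = m := by
  rw [PySem.Dict.foldl_insert_getD_add_one_eq_counter, PySem.Dict.keys_counter]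
  have hk : (fun k => (PySem.Dict.counter cells).getD k 0) = fun k => (cells.count k : Int) := by
    funext k; exact PySem.Dict.getD_counter cells k
  rw [hk, pv_max?_of_unique _ _ m ((PySem.Set.mem_ofList cells m).mpr hm)
      (fun v hv hne => by exact_mod_cast hstrict v ((PySem.Set.mem_ofList cells v).mp hv) hne)]
  rfl

lemma pv_w_eq (grid : List (List Int)) :
    ((PySem.List.pyGet? grid 0).getD []) = grid.headD [] := by
  cases grid <;> simp [PySem.List.pyGet?, PySem.List.pyIdx?]

lemma pv_toindices (patch : List (Int × Int)) : toindicesA patch = patch := by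
  cases patch <;> simp [toindicesA]

lemma pv_map_enumerate_length {α β : Type} (xs : List α) (f : Int × α → β) :
    ((PySem.List.enumerate xs 0).map f).length = xs.length := by
  simp [PySem.List.length_enumerate]

lemma pv_map_enumerate_getD {α β : Type} (xs : List α) (f : Int × α → β) (d : β) (i : Nat)
    (hi : i < xs.length) :
    ((PySem.List.enumerate xs 0).map f).getD i d = f ((i : Int), xs[i]) := by
  rw [List.getD_eq_getElem?_getD, List.getElem?_map, PySem.List.getElem?_enumerate]
  simp [List.getElem?_eq_getElem hi]

-- one step of A's loop moves the model from Q to Q ++ [p]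
lemma pv_step (grid : List (List Int)) (value bg : Int) (p : Int × Int) (Q : List (Int × Int))
    (g : List (List Int))
    (hragp : 0 ≤ p.1 → p.1 < (grid.length : Int) → 0 ≤ p.2 →
        (p.2 < ((grid.headD []).length : Int) ↔ p.2 < ((grid.getD p.1.toNat []).length : Int)))
    (hlen : g.length = grid.length)
    (hrow : ∀ i : Nat, (g.getD i []).length = (grid.getD i []).length)
    (hpt : ∀ i j : Nat, i < grid.length → j < (grid.getD i []).length →
        (g.getD i []).getD j 0 = pvModel grid value bg ((grid.headD []).length : Int) Q i j) :
    (pvFillA value (grid.length : Int) ((grid.headD []).length : Int) bg g p).length = grid.length ∧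
    (∀ i : Nat, ((pvFillA value (grid.length : Int) ((grid.headD []).length : Int) bg g p).getD i []).length = (grid.getD i []).length) ∧
    (∀ i j : Nat, i < grid.length → j < (grid.getD i []).length →
        ((pvFillA value (grid.length : Int) ((grid.headD []).length : Int) bg g p).getD i []).getD j 0 =
          pvModel grid value bg ((grid.headD []).length : Int) (Q ++ [p]) i j) := by
  unfold pvFillA
  by_cases hguard : 0 ≤ p.1 ∧ p.1 < (grid.length : Int) ∧ 0 ≤ p.2 ∧ p.2 < ((grid.headD []).length : Int)
  · obtain ⟨hp1, hp2, hp3, hp4⟩ := hguard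
    set a := p.1.toNat with hadef
    set b := p.2.toNat with hbdef
    rw [if_pos (⟨hp1, hp2, hp3, hp4⟩ : 0 ≤ p.1 ∧ p.1 < (grid.length : Int) ∧ 0 ≤ p.2 ∧ p.2 < ((grid.headD []).length : Int))]
    have hpa : (a : Int) = p.1 := Int.toNat_of_nonneg hp1
    have hpb : (b : Int) = p.2 := Int.toNat_of_nonneg hp3
    have ha : a < grid.length := by omega
    have hb : b < (grid.getD a []).length := by
      have := (hragp hp1 hp2 hp3).mp hp4
      omega
    have hbg : b < (g.getD a []).length := by rw [hrow a]; exact hb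
    have hcell : (g.getD a []).getD b 0 = pvModel grid value bg ((grid.headD []).length : Int) Q a b :=
      hpt a b ha hb
    by_cases hmatch : (g.getD a []).getD b 0 = bg
    · rw [if_pos hmatch]
      have hag : a < g.length := by omega
      refine ⟨by simp [hlen], ?_, ?_⟩
      · intro i
        rw [pv_getD_set g a i _ [] hag]
        by_cases hia : i = a
        · rw [if_pos hia, List.length_set, hia]; exact hrow a
        · rw [if_neg hia]; exact hrow i
      · intro i j hi hj
        rw [pv_getD_set g a i _ [] hag]
        by_cases hia : i = a
        · rw [if_pos hia]
          subst hia
          rw [pv_getD_set _ b j value 0 hbg]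
          by_cases hjb : j = b
          · rw [if_pos hjb]
            subst hjb
            -- the updated cell: the model on Q ++ [p] says `value` here
            have hgcell : (grid.getD a []).getD b 0 = bg := by
              unfold pvModel at hcell
              split_ifs at hcell with hc
              · exact hc.2.2
              · rw [← hcell]; exact hmatch
            have : pvModel grid value bg ((grid.headD []).length : Int) (Q ++ [p]) a b = value := by
              unfold pvModel
              rw [if_pos ⟨by simp [List.mem_append, hpa, hpb], by rw [hpb]; exact hp4, hgcell⟩]
            rw [this]
          · -- same row, other column: the model does not change
            rw [if_neg hjb, hpt a j ha hj]
            unfold pvModel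
            have hne : ¬ (((a : Int), (j : Int)) = p) := by
              intro hc
              exact hjb (by rw [hbdef, ← (Prod.ext_iff.mp hc).2]; omega)
            simp only [List.mem_append, List.mem_singleton, hne, or_false]
        · rw [if_neg hia, hpt i j hi hj]
          unfold pvModel
          have hne : ¬ (((i : Int), (j : Int)) = p) := by
            intro hc
            exact hia (by rw [hadef, ← (Prod.ext_iff.mp hc).1]; omega)
          simp only [List.mem_append, List.mem_singleton, hne, or_false]
    · rw [if_neg hmatch]
      refine ⟨hlen, hrow, ?_⟩
      intro i j hi hj
      rw [hpt i j hi hj]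
      unfold pvModel
      by_cases hm : (((i : Int), (j : Int)) = p)
      · have hmi : (i : Int) = p.1 := by simpa using congrArg Prod.fst hm
        have hmj : (j : Int) = p.2 := by simpa using congrArg Prod.snd hm
        have hia : a = i := by omega
        have hjb : b = j := by omega
        rw [hia, hjb] at hcell hmatch
        by_cases hq : (((i : Int), (j : Int)) ∈ Q ∧ (j : Int) < ((grid.headD []).length : Int) ∧ (grid.getD i []).getD j 0 = bg)
        · rw [if_pos hq, if_pos ⟨List.mem_append.mpr (Or.inl hq.1), hq.2⟩]
        · have hnotq2 : ¬(((i : Int), (j : Int)) ∈ Q ++ [p] ∧ (j : Int) < ((grid.headD []).length : Int) ∧ (grid.getD i []).getD j 0 = bg) := by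
            intro hq2
            have hgcell : (grid.getD i []).getD j 0 ≠ bg := by
              intro hc
              unfold pvModel at hcell
              rw [if_neg hq] at hcell
              exact hmatch (hcell.trans hc)
            exact hgcell hq2.2.2
          rw [if_neg hq, if_neg hnotq2]
      · simp only [List.mem_append, List.mem_singleton, hm, or_false]
  · rw [if_neg hguard]
    refine ⟨hlen, hrow, ?_⟩
    intro i j hi hj
    rw [hpt i j hi hj]
    unfold pvModel
    by_cases hm : (((i : Int), (j : Int)) = p)
    · -- (i, j) is a real cell, so the guard can only have failed on `j < w`
      have hmi : (i : Int) = p.1 := by simpa using congrArg Prod.fst hm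
      have hmj : (j : Int) = p.2 := by simpa using congrArg Prod.snd hm
      have h4 : ¬ ((j : Int) < ((grid.headD []).length : Int)) := by
        intro hc
        exact hguard ⟨by omega, by omega, by omega, by omega⟩
      rw [if_neg (fun hc => h4 hc.2.1), if_neg (fun hc => h4 hc.2.1)]
    · simp only [List.mem_append, List.mem_singleton, hm, or_false]

-- A's whole loop, by induction along the patch
lemma pv_fold_inv (grid : List (List Int)) (value bg : Int) (patch : List (Int × Int))
    (hrag : ∀ p ∈ patch, 0 ≤ p.1 → p.1 < (grid.length : Int) → 0 ≤ p.2 →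
        (p.2 < ((grid.headD []).length : Int) ↔ p.2 < ((grid.getD p.1.toNat []).length : Int))) :
    ∀ (P Q : List (Int × Int)) (g : List (List Int)),
    (∀ p ∈ P, p ∈ patch) →
    g.length = grid.length →
    (∀ i : Nat, (g.getD i []).length = (grid.getD i []).length) →
    (∀ i j : Nat, i < grid.length → j < (grid.getD i []).length →
        (g.getD i []).getD j 0 = pvModel grid value bg ((grid.headD []).length : Int) Q i j) →
    (P.foldl (pvFillA value (grid.length : Int) ((grid.headD []).length : Int) bg) g).length = grid.length ∧
    (∀ i : Nat, ((P.foldl (pvFillA value (grid.length : Int) ((grid.headD []).length : Int) bg) g).getD i []).length = (grid.getD i []).length) ∧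
    (∀ i j : Nat, i < grid.length → j < (grid.getD i []).length →
        ((P.foldl (pvFillA value (grid.length : Int) ((grid.headD []).length : Int) bg) g).getD i []).getD j 0 =
          pvModel grid value bg ((grid.headD []).length : Int) (Q ++ P) i j) := by
  intro P
  induction P with
  | nil =>
    intro Q g _ hlen hrow hpt
    exact ⟨hlen, hrow, fun i j hi hj => by rw [List.foldl_nil, hpt i j hi hj, List.append_nil]⟩
  | cons p P ih =>
    intro Q g hsub hlen hrow hpt
    have hstep := pv_step grid value bg p Q g (hrag p (hsub p List.mem_cons_self)) hlen hrow hpt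
    have := ih (Q ++ [p]) _ (fun q hq => hsub q (List.mem_cons_of_mem p hq))
      hstep.1 hstep.2.1 hstep.2.2
    simpa [List.append_assoc] using this

-- B's output, cell by cell
lemma pv_alt_cell (grid : List (List Int)) (value : Int) (patch : List (Int × Int)) (bg : Int)
    (i : Nat) (hi : i < grid.length) :
    ((PySem.List.enumerate grid 0).map (fun ir => (PySem.List.enumerate ir.2 0).map (fun jv =>
        if PySem.Set.contains (PySem.Set.ofList patch) (ir.1, jv.1) && (jv.2 == bg) then value
        else jv.2))).getD i [] =
      (PySem.List.enumerate (grid.getD i []) 0).map (fun jv =>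
        if PySem.Set.contains (PySem.Set.ofList patch) ((i : Int), jv.1) && (jv.2 == bg) then value
        else jv.2) := by
  rw [pv_map_enumerate_getD _ _ _ i hi, List.getD_eq_getElem _ _ hi]

-- ===== VERDICT (by name: the statement is the Claim_ definition above) =====
theorem underfill_spec : Claim_equal_underfill := by
  intro grid value patch _ hpre
  obtain ⟨hgrid, hcells, hrag, huniq⟩ := hpre
  unfold Spec_underfill
  -- A's result, characterized by pvModel
  have hu : underfill grid value patch =
      patch.foldl (pvFillA value (grid.length : Int) ((grid.headD []).length : Int) (mostcolorA grid)) grid := by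
    unfold underfill
    rw [pv_w_eq, pv_toindices]
  have hfold := pv_fold_inv grid value (mostcolorA grid) patch hrag patch [] grid
      (fun p hp => hp) rfl (fun i => rfl) (fun i j hi hj => by
        unfold pvModel
        rw [if_neg (by simp)])
  -- B's result, with its background colour written out
  have halt : underfill_alt grid value patch =
      (PySem.List.enumerate grid 0).map (fun ir => (PySem.List.enumerate ir.2 0).map (fun jv =>
        if PySem.Set.contains (PySem.Set.ofList patch) (ir.1, jv.1) &&
            (jv.2 == (PySem.List.max?
              (PySem.Dict.keys ((grid.flatMap (fun r => r)).foldl (fun d v => d.insert v (d.getD v 0 + 1)) (PySem.Dict.empty : PySem.Dict Int Int)))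
              (fun k => ((grid.flatMap (fun r => r)).foldl (fun d v => d.insert v (d.getD v 0 + 1)) (PySem.Dict.empty : PySem.Dict Int Int)).getD k 0)).getD 0) then value
        else jv.2)) := rfl
  rw [hu, halt]
  -- if some patch index names a real cell, the two background colours agree
  have hbg : (∃ p ∈ patch, 0 ≤ p.1 ∧ p.1 < (grid.length : Int) ∧ 0 ≤ p.2 ∧
        p.2 < ((grid.getD p.1.toNat []).length : Int)) →
      (PySem.List.max?
        (PySem.Dict.keys ((grid.flatMap (fun r => r)).foldl (fun d v => d.insert v (d.getD v 0 + 1)) (PySem.Dict.empty : PySem.Dict Int Int)))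
        (fun k => ((grid.flatMap (fun r => r)).foldl (fun d v => d.insert v (d.getD v 0 + 1)) (PySem.Dict.empty : PySem.Dict Int Int)).getD k 0)).getD 0
        = mostcolorA grid := by
    intro hhit
    obtain ⟨m, hm, hstrict⟩ := huniq hhit
    rw [pv_bgB _ m hm hstrict, pv_bgA grid m hm hstrict]
  -- the two grids, cell by cell
  apply List.ext_getElem (by rw [hfold.1, pv_map_enumerate_length])
  intro i hiA hiB
  have hi : i < grid.length := by rw [← hfold.1]; exact hiA
  rw [← List.getD_eq_getElem _ [] hiA, ← List.getD_eq_getElem _ [] hiB,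
    pv_alt_cell grid value patch _ i hi]
  apply List.ext_getElem (by rw [hfold.2.1 i, pv_map_enumerate_length])
  intro j hjA hjB
  have hj : j < (grid.getD i []).length := by rw [← hfold.2.1 i]; exact hjA
  rw [← List.getD_eq_getElem _ 0 hjA, ← List.getD_eq_getElem _ 0 hjB,
    pv_map_enumerate_getD _ _ _ j hj, hfold.2.2 i j hi hj]
  -- compare A's model with B's cell formula
  unfold pvModel
  rw [List.nil_append]
  rw [List.getD_eq_getElem _ 0 hj]
  by_cases hmem : (((i : Int), (j : Int)) ∈ patch)
  · -- the cell is a patched real cell, so the backgrounds coincide and `j < w` holds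
    have hhit : ∃ p ∈ patch, 0 ≤ p.1 ∧ p.1 < (grid.length : Int) ∧ 0 ≤ p.2 ∧
        p.2 < ((grid.getD p.1.toNat []).length : Int) :=
      ⟨((i : Int), (j : Int)), hmem, by omega, by show (i : Int) < (grid.length : Int); exact_mod_cast hi, by omega, by
        show ((i : Int), (j : Int)).2 < _
        simp only [Int.toNat_natCast]; exact_mod_cast hj⟩
    have hw : (j : Int) < ((grid.headD []).length : Int) := by
      have := hrag ((i : Int), (j : Int)) hmem (by omega) (by show (i : Int) < (grid.length : Int); exact_mod_cast hi) (by omega)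
      simp only [Int.toNat_natCast] at this
      exact this.mpr (by exact_mod_cast hj)
    rw [hbg hhit]
    have hcontains : PySem.Set.contains (PySem.Set.ofList patch) ((i : Int), (j : Int)) = true :=
      (PySem.Set.contains_iff _ _).mpr ((PySem.Set.mem_ofList _ _).mpr hmem)
    by_cases hcell : (grid.getD i [])[j] = mostcolorA grid
    · rw [if_pos ⟨hmem, hw, hcell⟩, if_pos (by rw [hcontains, beq_iff_eq.mpr hcell]; rfl)]
    · rw [if_neg (fun hc => hcell hc.2.2), if_neg (by
        intro hc
        rw [Bool.and_eq_true, beq_iff_eq] at hc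
        exact hcell hc.2)]
  · -- not patched: both sides leave the cell alone
    have hcontains : PySem.Set.contains (PySem.Set.ofList patch) ((i : Int), (j : Int)) = false := by
      rw [← Bool.not_eq_true]
      intro hc
      exact hmem ((PySem.Set.mem_ofList _ _).mp ((PySem.Set.contains_iff _ _).mp hc))
    rw [if_neg (fun hc => hmem hc.1), if_neg (by rw [hcontains]; simp)]
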